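-- pv_equiv track=rewrite | github.com/lukas-ke/lsp | lua/sillyparse.py | _find_word_end
-- ===== SOURCE A (Python) =====
-- NAME_SYMBOLS = "123456789ABCDEFGHIJKLMNOPQRSTUVWXYZabcdefghijklmnopqrstuvwxyz_"
--
-- def _find_word_end(line: str, char_num: int):
--     """Return the position of the last name symbol following char_num
--
--     """
--     if line[char_num] == '.':
--         # When char_num is at a ".", use its index as the end,
--         # so that "abc.def|." results in "abc.def"
--         # (This kind of makes sense, because insertion at this position
--         # would insert text before the ".").
--         return char_num
--
--     end = None
--     for i in range(char_num, len(line)):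
--         if line[i] in NAME_SYMBOLS:
--             end = i + 1
--         else:
--             break
--     return end
-- ===== SOURCE B (Python) =====
-- NAME_SYMBOLS = "123456789ABCDEFGHIJKLMNOPQRSTUVWXYZabcdefghijklmnopqrstuvwxyz_"
--
-- def _find_word_end(line: str, char_num: int):
--     """Return the end of the name-symbol run starting at char_num.
--
--     A negative char_num is treated as the position len(line)+char_num and the
--     scan stops at the end of the line (no wrap-around back to the start).
--     """
--     if line[char_num] == '.':
--         return char_num
--     start = char_num + len(line) if char_num < 0 else char_num
--     rest = line[start:]
--     k = len(rest) - len(rest.lstrip(NAME_SYMBOLS))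
--     return start + k if k else None
-- ===== Notes on version B (the rewrite author's own statement) =====
-- stated objective: faster
-- what changed: The per-character indexed loop with an accumulator and break is replaced by slicing line[start:] and measuring the leading name-symbol run arithmetically as len(rest) - len(rest.lstrip(NAME_SYMBOLS)) (the scan runs inside the C-implemented str.lstrip instead of a Python-level loop), with a negative char_num normalised to the position len(line)+char_num.
-- intended difference: For a negative char_num that points at a name symbol (unless the whole line consists of name symbols), A's loop wraps from the tail back to the start of the line (Python negative indexing inside the loop) and returns a misleading end (non-positive, or the end of the unrelated run at the start of the line); B returns the intended end of the run starting at position len(line)+char_num. — e.g. on _find_word_end("a.b", -1): A returns some 1, B returns some 3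
import Mathlib
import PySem

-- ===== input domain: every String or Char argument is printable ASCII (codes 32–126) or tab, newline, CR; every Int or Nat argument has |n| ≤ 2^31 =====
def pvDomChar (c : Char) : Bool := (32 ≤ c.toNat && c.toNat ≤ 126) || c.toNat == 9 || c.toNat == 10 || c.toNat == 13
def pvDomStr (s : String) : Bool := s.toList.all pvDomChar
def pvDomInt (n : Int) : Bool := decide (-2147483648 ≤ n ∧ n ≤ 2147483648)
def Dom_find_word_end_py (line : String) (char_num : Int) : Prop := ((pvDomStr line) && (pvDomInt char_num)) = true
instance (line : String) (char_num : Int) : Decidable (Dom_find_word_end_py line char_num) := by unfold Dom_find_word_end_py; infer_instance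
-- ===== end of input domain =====

-- B replaces A's per-character accumulating loop by slice + lstrip-length arithmetic and
-- normalises a negative char_num to a position from the end (intended fix, see D_ below).


-- NAME_SYMBOLS (module constant; note: '0' is deliberately absent)
def pvNameSymbols : List Char := "123456789ABCDEFGHIJKLMNOPQRSTUVWXYZabcdefghijklmnopqrstuvwxyz_".toList

-- c in NAME_SYMBOLS (membership of one char in the constant string; exact)
def pvIsName (c : Char) : Bool := pvNameSymbols.contains c

-- ===== PORT A =====
-- A's for-loop: iterate the range, end := i + 1 on a name symbol, break otherwise.
def findA_loop (l : List Char) (r : List Int) (e : Option Int) : Option Int :=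
  match r with
  | [] => e
  | i :: rest =>
    match PySem.List.pyGet? l i with
    | none => none      -- line[i] IndexError: unreachable once line[char_num] succeeded
    | some c => if pvIsName c then findA_loop l rest (some (i + 1)) else e

def find_word_end_py (line : String) (char_num : Int) : Option Int :=
  match PySem.Str.pyGet? line char_num with
  | none => none        -- line[char_num] raises IndexError: excluded by Pre_
  | some c =>
    if c = '.' then some char_num
    else findA_loop line.toList (PySem.List.pyRange char_num (line.toList.length : Int) 1) none

-- ===== PORT B =====
def find_word_end_py_alt (line : String) (char_num : Int) : Option Int :=
  match PySem.Str.pyGet? line char_num with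
  | none => none        -- line[char_num] raises IndexError: excluded by Pre_
  | some c =>
    if c = '.' then some char_num
    else
      let start : Int := if char_num < 0 then char_num + (line.toList.length : Int) else char_num
      let rest := PySem.List.slice line.toList (some start) none            -- line[start:]
      -- rest.lstrip(NAME_SYMBOLS) = drop the leading run of chars of the set (exact)
      let k : Int := (rest.length : Int) - ((rest.dropWhile pvIsName).length : Int)
      if k ≠ 0 then some (start + k) else none

-- ===== PRECONDITION & SPEC =====
-- Pre_ excludes exactly the inputs on which line[char_num] raises IndexError.
def Pre_find_word_end_py (line : String) (char_num : Int) : Prop :=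
  -(line.toList.length : Int) ≤ char_num ∧ char_num < (line.toList.length : Int)
instance (line : String) (char_num : Int) : Decidable (Pre_find_word_end_py line char_num) := by unfold Pre_find_word_end_py; infer_instance

def pvWitness_find_word_end_py : String × Int := ("ab cd", 3)

-- Negative char_num pointing at a name symbol (unless the whole line is name symbols): A's scan
-- wraps from the tail back to the start of the line (Python negative indexing inside its loop) and
-- returns a misleading end (non-positive, or the end of the unrelated run at the start of the line);
-- B returns the intended end of the run starting at position len(line)+char_num.
def D_find_word_end_py (line : String) (char_num : Int) : Prop :=
  char_num < 0 ∧
  (PySem.Str.pyGet? line char_num).any pvIsName = true ∧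
  line.toList.all pvIsName = false
instance (line : String) (char_num : Int) : Decidable (D_find_word_end_py line char_num) := by unfold D_find_word_end_py; infer_instance

def Spec_find_word_end_py (line : String) (char_num : Int) (out : Option Int) : Prop := ¬ D_find_word_end_py line char_num → out = find_word_end_py_alt line char_num
instance (line : String) (char_num : Int) (out : Option Int) : Decidable (Spec_find_word_end_py line char_num out) := by unfold Spec_find_word_end_py; infer_instance

def pvDiffWitness_find_word_end_py : String × Int := ("a.b", -1)
def pvDiffWitnessOut_find_word_end_py : (Option Int) × (Option Int) := (some 1, some 3)

-- ===== CLAIM (what is proved, stated in full; the proofs are below) =====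
def Claim_unchanged_find_word_end_py : Prop := ∀ (line : String) (char_num : Int), Dom_find_word_end_py line char_num → Pre_find_word_end_py line char_num → Spec_find_word_end_py line char_num (find_word_end_py line char_num)
def Claim_changed_find_word_end_py : Prop := Dom_find_word_end_py (pvDiffWitness_find_word_end_py.1) (pvDiffWitness_find_word_end_py.2) ∧ Pre_find_word_end_py (pvDiffWitness_find_word_end_py.1) (pvDiffWitness_find_word_end_py.2) ∧ D_find_word_end_py (pvDiffWitness_find_word_end_py.1) (pvDiffWitness_find_word_end_py.2) ∧ find_word_end_py (pvDiffWitness_find_word_end_py.1) (pvDiffWitness_find_word_end_py.2) = pvDiffWitnessOut_find_word_end_py.1 ∧ find_word_end_py_alt (pvDiffWitness_find_word_end_py.1) (pvDiffWitness_find_word_end_py.2) = pvDiffWitnessOut_find_word_end_py.2 ∧ pvDiffWitnessOut_find_word_end_py.1 ≠ pvDiffWitnessOut_find_word_end_py.2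
def Claim_exact_find_word_end_py : Prop := ∀ (line : String) (char_num : Int), Dom_find_word_end_py line char_num → Pre_find_word_end_py line char_num → D_find_word_end_py line char_num → find_word_end_py line char_num ≠ find_word_end_py_alt line char_num

-- ===== LEMMAS AND PROOFS =====

-- PySem.Str.pyGet? on a string is PySem.List.pyGet? on its character list.
theorem pvStr_pyGet (line : String) (i : Int) :
    PySem.Str.pyGet? line i = PySem.List.pyGet? line.toList i := rfl

-- Unfolding lemmas for the ports when the indexing succeeds.
theorem findA_loop_cons_some (l : List Char) (i : Int) (rest : List Int) (e : Option Int)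
    (c : Char) (h : PySem.List.pyGet? l i = some c) :
    findA_loop l (i :: rest) e =
      (if pvIsName c then findA_loop l rest (some (i + 1)) else e) := by
  rw [findA_loop, h]

-- The run length at position j: length of the name-symbol prefix of l.drop j.
def pvRun (l : List Char) (j : Nat) : Nat := ((l.drop j).takeWhile pvIsName).length

theorem pvRun_le (l : List Char) (j : Nat) : pvRun l j ≤ l.length - j := by
  have h : ((l.drop j).takeWhile pvIsName).length ≤ (l.drop j).length :=
    (List.takeWhile_sublist _).length_le
  simpa [pvRun] using h

theorem pvRun_cons (l : List Char) (j : Nat) (h : j < l.length) :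
    pvRun l j = if pvIsName l[j] then pvRun l (j + 1) + 1 else 0 := by
  unfold pvRun
  rw [List.drop_eq_getElem_cons h]
  by_cases hn : pvIsName l[j]
  · rw [List.takeWhile_cons_of_pos hn, if_pos hn]
    simp [Nat.add_comm]
  · rw [List.takeWhile_cons_of_neg (by simpa using hn), if_neg hn]
    simp

theorem pvRun_eq_sub (l : List Char) (j : Nat) :
    (pvRun l j : Int) = ((l.drop j).length : Int) - (((l.drop j).dropWhile pvIsName).length : Int) := by
  have h : ((l.drop j).takeWhile pvIsName).length + ((l.drop j).dropWhile pvIsName).length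
      = (l.drop j).length := by
    rw [← List.length_append, List.takeWhile_append_dropWhile]
  unfold pvRun
  omega

theorem pvRun_all (l : List Char) (j : Nat) (hall : l.all pvIsName = true) :
    pvRun l j = l.length - j := by
  unfold pvRun
  rw [List.all_eq_true] at hall
  rw [List.takeWhile_eq_self_iff.mpr (fun x hx => hall x (List.mem_of_mem_drop hx))]
  simp

theorem pvRun_zero_lt (l : List Char) (hnall : l.all pvIsName = false) :
    pvRun l 0 < l.length := by
  have hle := pvRun_le l 0
  rcases Nat.lt_or_ge (pvRun l 0) l.length with h | h
  · exact h
  · exfalso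
    have heq : l.takeWhile pvIsName = l := by
      apply (List.takeWhile_sublist (p := pvIsName) (l := l)).eq_of_length_le
      simpa [pvRun] using h
    have hta : l.all pvIsName = true :=
      List.all_eq_true.mpr (List.takeWhile_eq_self_iff.mp heq)
    rw [hta] at hnall
    exact Bool.noConfusion hnall

-- A's loop over the non-negative range [j, len) with accumulator e.
theorem findA_loop_nonneg (l : List Char) (j : Nat) (e : Option Int) (hj : j ≤ l.length) :
    findA_loop l (PySem.List.pyRange (j : Int) (l.length : Int) 1) e =
      (if pvRun l j = 0 then e else some ((j : Int) + (pvRun l j : Int))) := by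
  induction hd : l.length - j generalizing j e with
  | zero =>
    have hj' : j = l.length := by omega
    subst hj'
    rw [PySem.List.pyRange_one_eq_nil (by omega)]
    simp [findA_loop, pvRun]
  | succ d ih =>
    have hlt : j < l.length := by omega
    have hr := pvRun_cons l j hlt
    rw [PySem.List.pyRange_one_cons (by exact_mod_cast hlt)]
    have hget : PySem.List.pyGet? l (j : Int) = some l[j] := by
      rw [PySem.List.pyGet?_natCast]
      exact List.getElem?_eq_getElem hlt
    rw [findA_loop_cons_some l _ _ _ _ hget]
    by_cases hn : pvIsName l[j]
    · rw [if_pos hn]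
      rw [if_pos hn] at hr
      have hcast : ((j : Int) + 1) = ((j + 1 : Nat) : Int) := by omega
      rw [hcast, ih (j + 1) _ (by omega) (by omega), hr]
      split_ifs <;> first | rfl | (exact congrArg some (by omega)) | (exfalso; omega)
    · rw [if_neg hn]
      rw [if_neg hn] at hr
      simp [hr]

-- A's loop over a range starting at a negative index -m (1 ≤ m ≤ len): it scans the
-- tail l.drop (len - m); if the whole tail is name symbols it continues from index 0
-- with accumulator some 0, otherwise it stops inside the tail.
theorem findA_loop_neg (l : List Char) (m : Nat) (e : Option Int) (h1 : 1 ≤ m) (h2 : m ≤ l.length) :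
    findA_loop l (PySem.List.pyRange (-(m : Int)) (l.length : Int) 1) e =
      (if pvRun l (l.length - m) < m then
        (if pvRun l (l.length - m) = 0 then e else some (-(m : Int) + (pvRun l (l.length - m) : Int)))
       else findA_loop l (PySem.List.pyRange 0 (l.length : Int) 1) (some 0)) := by
  induction m generalizing e with
  | zero => omega
  | succ m ih =>
    have hlt : l.length - (m + 1) < l.length := by omega
    have hr := pvRun_cons l (l.length - (m + 1)) hlt
    rw [PySem.List.pyRange_one_cons (by push_cast; omega)]
    have hget : PySem.List.pyGet? l (-((m + 1 : Nat) : Int)) = some l[l.length - (m + 1)] := by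
      rw [PySem.List.pyGet?_neg_natCast (xs := l) (k := m + 1) (by omega) (by omega)]
      exact List.getElem?_eq_getElem hlt
    rw [findA_loop_cons_some l _ _ _ _ hget]
    by_cases hn : pvIsName l[l.length - (m + 1)]
    · rw [if_pos hn]
      rw [if_pos hn] at hr
      rcases Nat.eq_zero_or_pos m with hm0 | hmpos
      · subst hm0
        have hrun1 : pvRun l (l.length - (0 + 1)) = 1 := by
          have h2' := pvRun_le l (l.length - (0 + 1) + 1)
          omega
        rw [show (-((0 + 1 : Nat) : Int) + 1) = 0 from by omega]
        simp [hrun1]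
      · have hstep : (-((m + 1 : Nat) : Int) + 1) = -((m : Nat) : Int) := by omega
        rw [hstep, ih (some (-((m : Nat) : Int))) hmpos (by omega)]
        have hidx : l.length - (m + 1) + 1 = l.length - m := by omega
        rw [hidx] at hr
        rw [hr]
        split_ifs <;> first | rfl | (exact congrArg some (by omega)) | (exfalso; omega)
    · rw [if_neg hn]
      rw [if_neg hn] at hr
      simp [hr]

-- B, when line[char_num] is not '.', computed in terms of pvRun at the normalised start j.
theorem alt_run (line : String) (char_num : Int) (c : Char) (j : Nat)
    (hget : PySem.Str.pyGet? line char_num = some c) (hdot : ¬ c = '.')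
    (hstart : (if char_num < 0 then char_num + (line.toList.length : Int) else char_num) = (j : Int)) :
    find_word_end_py_alt line char_num =
      (if pvRun line.toList j = 0 then none else some ((j : Int) + (pvRun line.toList j : Int))) := by
  unfold find_word_end_py_alt
  rw [hget]
  simp only [if_neg hdot]
  rw [hstart, PySem.List.slice_from_natCast]
  have hks := pvRun_eq_sub line.toList j
  by_cases hz : pvRun line.toList j = 0
  · rw [if_pos hz]
    rw [if_neg (by omega)]
  · rw [if_neg hz]
    rw [if_pos (by omega)]
    congr 1
    omega

theorem find_word_end_py_spec : Claim_unchanged_find_word_end_py := by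
  intro line char_num hDom hPre hnD
  obtain ⟨hge, hlt⟩ := hPre
  show find_word_end_py line char_num = find_word_end_py_alt line char_num
  by_cases hsign : 0 ≤ char_num
  · -- non-negative char_num: A and B perform the same scan
    obtain ⟨j, rfl⟩ : ∃ j : Nat, char_num = (j : Int) := ⟨char_num.toNat, by omega⟩
    have hj : j < line.toList.length := by exact_mod_cast hlt
    have hget : PySem.Str.pyGet? line (j : Int) = some line.toList[j] := by
      rw [pvStr_pyGet, PySem.List.pyGet?_natCast]
      exact List.getElem?_eq_getElem hj
    by_cases hdot : line.toList[j] = '.'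
    · unfold find_word_end_py find_word_end_py_alt
      rw [hget]
      simp only [if_pos hdot]
    · rw [alt_run line (j : Int) line.toList[j] j hget hdot (by rw [if_neg (by omega : ¬ (j : Int) < 0)])]
      unfold find_word_end_py
      rw [hget]
      simp only [if_neg hdot]
      exact findA_loop_nonneg line.toList j none (by omega)
  · -- negative char_num, outside D_: either no name symbol at the start (both return none)
    -- or the whole line is name symbols (both return len(line))
    obtain ⟨m, hm⟩ : ∃ m : Nat, char_num = -(m : Int) := ⟨(-char_num).toNat, by omega⟩
    subst hm
    have hm1 : 1 ≤ m := by omega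
    have hm2 : m ≤ line.toList.length := by omega
    have hjlt : line.toList.length - m < line.toList.length := by omega
    have hget : PySem.Str.pyGet? line (-(m : Int)) = some line.toList[line.toList.length - m] := by
      rw [pvStr_pyGet, PySem.List.pyGet?_neg_natCast (xs := line.toList) (k := m) (by omega) (by omega)]
      exact List.getElem?_eq_getElem hjlt
    by_cases hdot : line.toList[line.toList.length - m] = '.'
    · unfold find_word_end_py find_word_end_py_alt
      rw [hget]
      simp only [if_pos hdot]
    · have hstart : (if -(m : Int) < 0 then -(m : Int) + (line.toList.length : Int) else -(m : Int))
          = ((line.toList.length - m : Nat) : Int) := by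
        rw [if_pos (by omega)]
        omega
      rw [alt_run line (-(m : Int)) line.toList[line.toList.length - m] (line.toList.length - m) hget hdot hstart]
      unfold find_word_end_py
      rw [hget]
      simp only [if_neg hdot]
      rw [findA_loop_neg line.toList m none hm1 hm2]
      -- ¬ D_ gives: the char at the start is not a name symbol, or the whole line is names
      have hD : ¬ (pvIsName line.toList[line.toList.length - m] = true ∧
          line.toList.all pvIsName = false) := by
        intro ⟨ha, hb⟩
        exact hnD ⟨by omega, by rw [hget]; simpa using ha, hb⟩
      by_cases hn : pvIsName line.toList[line.toList.length - m]
      · -- whole line is name symbols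
        have hall : line.toList.all pvIsName = true := by
          rcases Bool.eq_false_or_eq_true (line.toList.all pvIsName) with hf | ht
          · exact hf
          · exact absurd ⟨hn, ht⟩ hD
        have hrun : pvRun line.toList (line.toList.length - m) = m := by
          rw [pvRun_all line.toList _ hall]
          omega
        rw [hrun]
        rw [if_neg (by omega : ¬ m < m)]
        have h0 := findA_loop_nonneg line.toList 0 (some 0) (by omega)
        rw [Nat.cast_zero] at h0
        rw [h0]
        have hrun0 : pvRun line.toList 0 = line.toList.length := by
          rw [pvRun_all line.toList 0 hall]
          omega
        rw [hrun0]
        rw [if_neg (by omega : ¬ line.toList.length = 0), if_neg (by omega : ¬ m = 0)]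
        congr 1
        omega
      · -- no name symbol at the start: both none
        have hrun : pvRun line.toList (line.toList.length - m) = 0 := by
          rw [pvRun_cons line.toList _ hjlt, if_neg hn]
        rw [hrun]
        rw [if_pos (by omega), if_pos rfl, if_pos rfl]

theorem find_word_end_py_changed : Claim_changed_find_word_end_py := by
  unfold Claim_changed_find_word_end_py
  decide

theorem find_word_end_py_tight : Claim_exact_find_word_end_py := by
  intro line char_num hDom hPre hD
  obtain ⟨hge, hlt⟩ := hPre
  obtain ⟨hneg, hany, hnall⟩ := hD
  obtain ⟨m, hm⟩ : ∃ m : Nat, char_num = -(m : Int) := ⟨(-char_num).toNat, by omega⟩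
  subst hm
  have hm1 : 1 ≤ m := by omega
  have hm2 : m ≤ line.toList.length := by omega
  have hjlt : line.toList.length - m < line.toList.length := by omega
  have hget : PySem.Str.pyGet? line (-(m : Int)) = some line.toList[line.toList.length - m] := by
    rw [pvStr_pyGet, PySem.List.pyGet?_neg_natCast (xs := line.toList) (k := m) (by omega) (by omega)]
    exact List.getElem?_eq_getElem hjlt
  rw [hget] at hany
  have hn : pvIsName line.toList[line.toList.length - m] = true := by simpa using hany
  have hdot : ¬ line.toList[line.toList.length - m] = '.' := by
    intro h
    rw [h] at hn
    exact absurd hn (by decide)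
  have hrun1 : 1 ≤ pvRun line.toList (line.toList.length - m) := by
    rw [pvRun_cons line.toList _ hjlt, if_pos hn]
    omega
  have hrunle := pvRun_le line.toList (line.toList.length - m)
  have hstart : (if -(m : Int) < 0 then -(m : Int) + (line.toList.length : Int) else -(m : Int))
      = ((line.toList.length - m : Nat) : Int) := by
    rw [if_pos (by omega)]
    omega
  rw [alt_run line (-(m : Int)) line.toList[line.toList.length - m] (line.toList.length - m) hget hdot hstart]
  unfold find_word_end_py
  rw [hget]
  simp only [if_neg hdot]
  rw [findA_loop_neg line.toList m none hm1 hm2]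
  rw [if_neg (by omega : ¬ pvRun line.toList (line.toList.length - m) = 0)]
  by_cases hcase : pvRun line.toList (line.toList.length - m) < m
  · -- A stops inside the tail: its value is negative, B's is positive
    rw [if_pos hcase]
    intro h
    rw [if_neg (by omega : ¬ pvRun line.toList (line.toList.length - m) = 0)] at h
    have := Option.some.inj h
    omega
  · -- the whole tail is name symbols: A returns the prefix run of the line (< len), B returns len
    rw [if_neg hcase]
    have h0 := findA_loop_nonneg line.toList 0 (some 0) (by omega)
    rw [Nat.cast_zero] at h0
    rw [h0]
    have hlt0 := pvRun_zero_lt line.toList hnall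
    intro h
    rw [if_neg (by omega : ¬ pvRun line.toList (line.toList.length - m) = 0)] at h
    by_cases hz : pvRun line.toList 0 = 0
    · rw [if_pos hz] at h
      have := Option.some.inj h
      omega
    · rw [if_neg hz] at h
      have := Option.some.inj h
      omega
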